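-- pv_equiv track=rewrite | github.com/Julesc013/dominium | scripts/audit/generate_inventory.py | infer_subsystem
-- ===== SOURCE A (Python) =====
-- def infer_subsystem(rel_path: str) -> str:
--     for prefix in (
--         "engine/",
--         "game/",
--         "client/",
--         "server/",
--         "launcher/",
--         "setup/",
--         "tools/",
--         "libs/",
--         "app/",
--         "shared_ui_win32/",
--     ):
--         if rel_path.startswith(prefix):
--             return prefix.rstrip("/")
--     if rel_path.startswith("schema/"):
--         return "schema"
--     if rel_path.startswith("data/"):
--         return "data"
--     if rel_path.startswith("tests/"):
--         return "tests"
--     if rel_path.startswith("scripts/"):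
--         return "scripts"
--     if rel_path.startswith("cmake/"):
--         return "cmake"
--     if rel_path.startswith("ci/"):
--         return "ci"
--     return "root"
-- ===== SOURCE B (Python) =====
-- _SUBSYSTEMS = frozenset({
--     "engine", "game", "client", "server", "launcher", "setup", "tools",
--     "libs", "app", "shared_ui_win32", "schema", "data", "tests",
--     "scripts", "cmake", "ci",
-- })
--
--
-- def infer_subsystem(rel_path: str) -> str:
--     head, sep, _ = rel_path.partition("/")
--     return head if sep and head in _SUBSYSTEMS else "root"
-- ===== Notes on version B (the rewrite author's own statement) =====
-- stated objective: idiomatic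
-- what changed: Replaces the ordered chain of 16 startswith prefix tests with one partition on the first slash plus a single frozenset membership lookup.
import Mathlib
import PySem

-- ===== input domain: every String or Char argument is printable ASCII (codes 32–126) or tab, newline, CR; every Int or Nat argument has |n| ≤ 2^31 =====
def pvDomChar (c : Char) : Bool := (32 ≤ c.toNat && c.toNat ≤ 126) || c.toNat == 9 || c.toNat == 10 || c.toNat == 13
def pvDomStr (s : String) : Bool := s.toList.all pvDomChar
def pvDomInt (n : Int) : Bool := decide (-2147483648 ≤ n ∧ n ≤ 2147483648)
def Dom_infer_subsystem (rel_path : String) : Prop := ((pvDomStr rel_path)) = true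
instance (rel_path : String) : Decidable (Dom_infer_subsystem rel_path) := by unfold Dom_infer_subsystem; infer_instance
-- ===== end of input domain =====

-- B replaces A's ordered chain of 16 startswith prefix tests with one split at the
-- first slash plus a single set-membership lookup (idiomatic; same observable value).


-- ===== PORT A =====
-- hand port of str.rstrip("/"): drop trailing '/' characters (exact)
def pvRstripSlash (s : String) : String :=
  String.ofList ((s.toList.reverse.dropWhile (· = '/')).reverse)

def pvPrefixesA : List String :=
  ["engine/", "game/", "client/", "server/", "launcher/", "setup/", "tools/",
   "libs/", "app/", "shared_ui_win32/"]

-- the 'for prefix in (...): if rel_path.startswith(prefix): return ...' loop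
def pvLoopA (ps : List String) (rel_path : String) : Option String :=
  match ps with
  | [] => none
  | p :: rest =>
      if PySem.Str.startswith rel_path p then some (pvRstripSlash p)
      else pvLoopA rest rel_path

def infer_subsystem (rel_path : String) : String :=
  match pvLoopA pvPrefixesA rel_path with
  | some r => r
  | none =>
      if PySem.Str.startswith rel_path "schema/" then "schema"
      else if PySem.Str.startswith rel_path "data/" then "data"
      else if PySem.Str.startswith rel_path "tests/" then "tests"
      else if PySem.Str.startswith rel_path "scripts/" then "scripts"
      else if PySem.Str.startswith rel_path "cmake/" then "cmake"
      else if PySem.Str.startswith rel_path "ci/" then "ci"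
      else "root"

-- ===== PORT B =====
-- hand port of rel_path.partition("/") restricted to what B uses:
-- 'some head' = the part before the FIRST '/' when a '/' occurs, 'none' = no '/' (exact)
def pvHead? (l : List Char) : Option (List Char) :=
  match l with
  | [] => none
  | c :: cs => if c = '/' then some [] else (pvHead? cs).map (c :: ·)

def pvSubsystems : List String :=
  ["engine", "game", "client", "server", "launcher", "setup", "tools",
   "libs", "app", "shared_ui_win32", "schema", "data", "tests",
   "scripts", "cmake", "ci"]

def infer_subsystem_alt (rel_path : String) : String :=
  match pvHead? rel_path.toList with
  | none => "root"
  | some h =>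
      let head := String.ofList h
      if pvSubsystems.contains head then head else "root"

-- ===== PRECONDITION & SPEC =====
def Spec_infer_subsystem (rel_path : String) (out : String) : Prop := out = infer_subsystem_alt rel_path
instance (rel_path : String) (out : String) : Decidable (Spec_infer_subsystem rel_path out) := by unfold Spec_infer_subsystem; infer_instance

-- ===== CLAIM (what is proved, stated in full; the proofs are below) =====
def Claim_equal_infer_subsystem : Prop := ∀ (rel_path : String), Dom_infer_subsystem rel_path → Spec_infer_subsystem rel_path (infer_subsystem rel_path)

-- ===== LEMMAS AND PROOFS =====
theorem prefix_slash_iff_head (n : List Char) (h : '/' ∉ n) (l : List Char) :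
    (n ++ ['/']) <+: l ↔ pvHead? l = some n := by
  induction n generalizing l with
  | nil =>
      cases l with
      | nil => simp [pvHead?]
      | cons c cs =>
          by_cases hc : c = '/'
          · subst hc; simp [pvHead?, List.cons_prefix_cons]
          · simp [pvHead?, hc, List.cons_prefix_cons]
            exact fun e => hc e.symm
  | cons a n' ih =>
      have ha : ¬ '/' = a := fun e => h (List.mem_cons.mpr (Or.inl e))
      have hn' : '/' ∉ n' := fun e => h (List.mem_cons_of_mem _ e)
      cases l with
      | nil => simp [pvHead?]
      | cons c cs =>
          by_cases hc : c = '/'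
          · subst hc
            constructor
            · intro hpre
              rw [List.cons_append, List.cons_prefix_cons] at hpre
              exact absurd hpre.1.symm ha
            · intro he; simp [pvHead?] at he
          · simp only [pvHead?, if_neg hc, List.cons_append, List.cons_prefix_cons,
              ih hn', Option.map_eq_some_iff]
            constructor
            · rintro ⟨hca, hh⟩; exact ⟨n', hh, by rw [hca]⟩
            · rintro ⟨x, hx, hcx⟩
              injection hcx with h1 h2
              exact ⟨h1.symm, h2 ▸ hx⟩

theorem sw (s p name : String) (hp : p.toList = name.toList ++ ['/'])
    (h : '/' ∉ name.toList) :
    PySem.Str.startswith s p = decide (pvHead? s.toList = some name.toList) := by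
  rw [PySem.Str.startswith_eq, hp]
  by_cases hd : pvHead? s.toList = some name.toList
  · have hpre : (name.toList ++ ['/']) <+: s.toList :=
      (prefix_slash_iff_head _ h _).mpr hd
    simp [hd, (PySem.Chars.startswith_iff _ _).mpr hpre]
  · have hb : PySem.Chars.startswith s.toList (name.toList ++ ['/']) = false := by
      rw [Bool.eq_false_iff]
      intro hb'
      exact hd ((prefix_slash_iff_head _ h _).mp ((PySem.Chars.startswith_iff _ _).mp hb'))
    simp [hd, hb]

-- ===== VERDICT (by name: the statement is the Claim_ definition above) =====
theorem infer_subsystem_spec : Claim_equal_infer_subsystem := by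
  intro s _
  simp only [Spec_infer_subsystem, infer_subsystem, infer_subsystem_alt, pvLoopA, pvPrefixesA]
  rw [sw s "engine/" "engine" (by decide) (by decide),
      sw s "game/" "game" (by decide) (by decide),
      sw s "client/" "client" (by decide) (by decide),
      sw s "server/" "server" (by decide) (by decide),
      sw s "launcher/" "launcher" (by decide) (by decide),
      sw s "setup/" "setup" (by decide) (by decide),
      sw s "tools/" "tools" (by decide) (by decide),
      sw s "libs/" "libs" (by decide) (by decide),
      sw s "app/" "app" (by decide) (by decide),
      sw s "shared_ui_win32/" "shared_ui_win32" (by decide) (by decide),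
      sw s "schema/" "schema" (by decide) (by decide),
      sw s "data/" "data" (by decide) (by decide),
      sw s "tests/" "tests" (by decide) (by decide),
      sw s "scripts/" "scripts" (by decide) (by decide),
      sw s "cmake/" "cmake" (by decide) (by decide),
      sw s "ci/" "ci" (by decide) (by decide)]
  cases hh : pvHead? s.toList with
  | none => simp
  | some hl =>
      have hmk : ∀ t : String, (String.ofList hl = t) ↔ (hl = t.toList) := by
        intro t
        constructor
        · intro he; rw [← he, String.toList_ofList]
        · intro he; rw [he, String.ofList_toList]
      simp only [Option.some.injEq, pvSubsystems, List.contains_eq_mem,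
        decide_eq_true_eq, List.mem_cons, List.not_mem_nil, or_false]
      by_cases h1 : hl = ['e', 'n', 'g', 'i', 'n', 'e']; · subst h1; decide
      by_cases h2 : hl = ['g', 'a', 'm', 'e']; · subst h2; decide
      by_cases h3 : hl = ['c', 'l', 'i', 'e', 'n', 't']; · subst h3; decide
      by_cases h4 : hl = ['s', 'e', 'r', 'v', 'e', 'r']; · subst h4; decide
      by_cases h5 : hl = ['l', 'a', 'u', 'n', 'c', 'h', 'e', 'r']; · subst h5; decide
      by_cases h6 : hl = ['s', 'e', 't', 'u', 'p']; · subst h6; decide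
      by_cases h7 : hl = ['t', 'o', 'o', 'l', 's']; · subst h7; decide
      by_cases h8 : hl = ['l', 'i', 'b', 's']; · subst h8; decide
      by_cases h9 : hl = ['a', 'p', 'p']; · subst h9; decide
      by_cases h10 : hl = ['s', 'h', 'a', 'r', 'e', 'd', '_', 'u', 'i', '_', 'w', 'i', 'n', '3', '2']; · subst h10; decide
      by_cases h11 : hl = ['s', 'c', 'h', 'e', 'm', 'a']; · subst h11; decide
      by_cases h12 : hl = ['d', 'a', 't', 'a']; · subst h12; decide
      by_cases h13 : hl = ['t', 'e', 's', 't', 's']; · subst h13; decide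
      by_cases h14 : hl = ['s', 'c', 'r', 'i', 'p', 't', 's']; · subst h14; decide
      by_cases h15 : hl = ['c', 'm', 'a', 'k', 'e']; · subst h15; decide
      by_cases h16 : hl = ['c', 'i']; · subst h16; decide
      simp [hmk, h1, h2, h3, h4, h5, h6, h7, h8, h9, h10, h11, h12, h13, h14, h15, h16]
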